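-- pv_equiv track=rewrite | github.com/vaishvik24/CS515-Project2-BC-calculator | bc.py | relational_cond_var
-- ===== SOURCE A (Python) =====
-- def relational_cond_var(statement):
--     """
--     parse relation condition based token for evaluation
--     :param statement: token input
--     :return: variable and remaining token
--     """
--     statement = statement.replace(" ", "")
--     var = ''
--     i = 0
--     while i < len(statement):
--         if statement[i].isalnum() or statement[i] == '_':
--             var += statement[i]
--         elif statement[i] == '=':
--             i += 1
--             break
--         i += 1
--     return var, statement[i:]
-- ===== SOURCE B (Python) =====
-- def relational_cond_var(statement):
--     """
--     parse relation condition based token for evaluation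
--     :param statement: token input
--     :return: variable and remaining token
--     """
--     prefix, _, rest = statement.replace(" ", "").partition('=')
--     var = ''.join(c for c in prefix if c.isalnum() or c == '_')
--     return var, rest
-- ===== Notes on version B (the rewrite author's own statement) =====
-- stated objective: idiomatic
-- what changed: Replaces the indexed while-loop with break (which filters while scanning and slices from the break index) by str.partition('=') followed by a filter over the prefix only.
import Mathlib
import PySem

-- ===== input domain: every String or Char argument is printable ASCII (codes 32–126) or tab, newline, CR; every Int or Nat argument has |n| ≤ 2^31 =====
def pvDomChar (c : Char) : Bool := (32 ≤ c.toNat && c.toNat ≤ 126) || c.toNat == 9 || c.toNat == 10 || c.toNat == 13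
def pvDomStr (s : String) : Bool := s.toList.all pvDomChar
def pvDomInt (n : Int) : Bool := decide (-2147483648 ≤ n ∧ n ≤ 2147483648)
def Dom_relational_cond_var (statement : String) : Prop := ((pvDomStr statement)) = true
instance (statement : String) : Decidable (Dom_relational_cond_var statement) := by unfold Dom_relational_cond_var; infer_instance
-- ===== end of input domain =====

-- B replaces A's indexed while-loop-with-break by partition('=') then a filter of the prefix (idiomatic decomposition); equivalence proved on all printable-ASCII inputs.


-- ===== PORT A =====
-- the while-loop: scans the char list, collecting alnum/'_' chars into var (var += c),
-- breaking at '='; returns (var, remaining chars after the break point / [] at the end)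
def pvLoopA : List Char → List Char → List Char × List Char
  | [], var => (var, [])
  | c :: rest, var =>
      if c.isAlphanum || c = '_' then pvLoopA rest (var ++ [c])
      else if c = '=' then (var, rest)
      else pvLoopA rest var

def relational_cond_var (statement : String) : String × String :=
  let s := (PySem.Str.replace statement " " "").toList  -- statement.replace(" ", "")
  let r := pvLoopA s []
  (String.mk r.1, String.mk r.2)

-- ===== PORT B =====
-- hand port of str.partition('=') for the single-char separator '=': exact — returns
-- (text before the first '=', text after it), and (whole string, '') when '=' is absent
def pvPartitionEq : List Char → List Char × List Char
  | [] => ([], [])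
  | c :: rest =>
      if c = '=' then ([], rest)
      else
        let r := pvPartitionEq rest
        (c :: r.1, r.2)

def relational_cond_var_alt (statement : String) : String × String :=
  let s := (PySem.Str.replace statement " " "").toList  -- statement.replace(" ", "")
  let pr := pvPartitionEq s                             -- prefix, _, rest = ….partition('=')
  let var := pr.1.filter (fun c => c.isAlphanum || c = '_')  -- ''.join(c for c in prefix if …)
  (String.mk var, String.mk pr.2)

-- ===== PRECONDITION & SPEC =====
def Spec_relational_cond_var (statement : String) (out : String × String) : Prop := out = relational_cond_var_alt statement
instance (statement : String) (out : String × String) : Decidable (Spec_relational_cond_var statement out) := by unfold Spec_relational_cond_var; infer_instance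

-- ===== CLAIM (what is proved, stated in full; the proofs are below) =====
def Claim_equal_relational_cond_var : Prop := ∀ (statement : String), Dom_relational_cond_var statement → Spec_relational_cond_var statement (relational_cond_var statement)

-- ===== LEMMAS AND PROOFS =====
theorem pvLoopA_eq_partition (s var : List Char) :
    pvLoopA s var =
      (var ++ (pvPartitionEq s).1.filter (fun c => c.isAlphanum || c = '_'),
       (pvPartitionEq s).2) := by
  induction s generalizing var with
  | nil => simp [pvLoopA, pvPartitionEq]
  | cons c rest ih =>
    by_cases hp : (c.isAlphanum || c = '_') = true
    · have hne : ¬ c = '=' := by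
        rcases Bool.or_eq_true_iff.mp hp with h | h
        · intro hc; subst hc; simp [Char.isAlphanum, Char.isAlpha, Char.isDigit,
            Char.isUpper, Char.isLower] at h
        · intro hc; subst hc; exact absurd (of_decide_eq_true h) (by decide)
      simp [pvLoopA, pvPartitionEq, hp, hne, ih]
    · by_cases he : c = '='
      · simp [pvLoopA, pvPartitionEq, hp, he]
      · simp [pvLoopA, pvPartitionEq, hp, he, ih]

-- ===== VERDICT (by name: the statement is the Claim_ definition above) =====
theorem relational_cond_var_spec : Claim_equal_relational_cond_var := by
  intro statement _
  unfold Spec_relational_cond_var relational_cond_var relational_cond_var_alt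
  simp [pvLoopA_eq_partition]
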